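-- pv_equiv track=rewrite | github.com/BlanchonMarc/CodeWars | longest-consec.py | longest_consec
-- ===== SOURCE A (Python) =====
-- def longest_consec(strarr, k):
--     # your code
--     n = len(strarr)
--     arr = []
--     strconc = []
--     if n == 0 or k > n or k <= 0:
--         return ""
--     else:
--         arr = [len(x) for x in strarr]
--
--     tempCounter = 0
--
--     for i in range(len(strarr) - k + 1):
--         for j in range(k):
--             tempCounter += len(strarr[i + j])
--
--         strconc.append(tempCounter)
--         tempCounter = 0
--
--     indexmax = strconc.index(max(strconc))
--
--     tmpStr = []
--
--     for i in range(indexmax, indexmax + k):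
--         tmpStr.append(strarr[i])
--
--     return ''.join(tmpStr)
-- ===== SOURCE B (Python) =====
-- def longest_consec(strarr, k):
--     n = len(strarr)
--     if n == 0 or k > n or k <= 0:
--         return ""
--     prefix = [0]
--     total = 0
--     for s in strarr:
--         total += len(s)
--         prefix.append(total)
--     sums = [prefix[i + k] - prefix[i] for i in range(n - k + 1)]
--     i = sums.index(max(sums))
--     return ''.join(strarr[i:i + k])
-- ===== Notes on version B (the rewrite author's own statement) =====
-- stated objective: faster
-- what changed: Replaces the O(n*k) nested loop summing each window from scratch with a prefix-sum array built in one pass, so each window total is one subtraction, and replaces the element-by-element result loop with a slice join.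
import Mathlib
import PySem

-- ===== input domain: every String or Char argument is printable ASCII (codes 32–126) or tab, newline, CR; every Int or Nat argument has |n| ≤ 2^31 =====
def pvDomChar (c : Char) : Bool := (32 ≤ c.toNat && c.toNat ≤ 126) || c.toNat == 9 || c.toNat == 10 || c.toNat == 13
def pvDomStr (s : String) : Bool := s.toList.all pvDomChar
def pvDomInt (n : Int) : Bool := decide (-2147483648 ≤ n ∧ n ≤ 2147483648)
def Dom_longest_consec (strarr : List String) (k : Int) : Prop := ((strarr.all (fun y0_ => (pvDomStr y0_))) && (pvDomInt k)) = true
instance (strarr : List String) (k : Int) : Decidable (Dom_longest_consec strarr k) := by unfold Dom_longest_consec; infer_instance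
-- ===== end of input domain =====

-- B replaces A's O(n*k) per-window re-summation with a one-pass prefix-sum array and a slice join (asymptotically faster).


-- ===== PORT A =====
-- literal port of A: per window i, an inner loop over range(k) re-sums the k lengths;
-- then strconc.index(max(strconc)); then a loop appending strarr[i] for i in [indexmax, indexmax+k).
-- ('arr = [len(x) for x in strarr]' is computed by A but never used; it is pure, so it is dropped.)
def longest_consec (strarr : List String) (k : Int) : String :=
  let n : Int := strarr.length
  if n = 0 ∨ k > n ∨ k ≤ 0 then ""
  else
    let strconc : List Int :=
      (PySem.List.pyRange 0 ((strarr.length : Int) - k + 1) 1).map (fun i =>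
        (PySem.List.pyRange 0 k 1).foldl
          (fun tempCounter j => tempCounter + (PySem.Str.len (PySem.List.pyGetD strarr (i + j) "") : Int)) 0)
    match PySem.List.max? strconc (fun x => x) with
    | none => ""   -- unreachable: the guard makes strconc nonempty
    | some m =>
      match PySem.List.index? strconc m with
      | none => ""   -- unreachable: m ∈ strconc
      | some indexmax =>
        PySem.Str.join ""
          ((PySem.List.pyRange (indexmax : Int) ((indexmax : Int) + k) 1).map
            (fun i => PySem.List.pyGetD strarr i ""))

-- ===== PORT B =====
-- literal port of B: one pass builds prefix sums, each window total is one subtraction, slice join.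
def longest_consec_alt (strarr : List String) (k : Int) : String :=
  let n : Int := strarr.length
  if n = 0 ∨ k > n ∨ k ≤ 0 then ""
  else
    let st := strarr.foldl
      (fun (st : Int × List Int) s =>
        (st.1 + (PySem.Str.len s : Int), st.2 ++ [st.1 + (PySem.Str.len s : Int)]))
      (0, [0])
    let prefixL : List Int := st.2
    let sums : List Int :=
      (PySem.List.pyRange 0 (n - k + 1) 1).map
        (fun i => PySem.List.pyGetD prefixL (i + k) 0 - PySem.List.pyGetD prefixL i 0)
    match PySem.List.max? sums (fun x => x) with
    | none => ""   -- unreachable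
    | some m =>
      match PySem.List.index? sums m with
      | none => ""   -- unreachable
      | some i =>
        PySem.Str.join "" (PySem.List.slice strarr (some (i : Int)) (some ((i : Int) + k)))

-- ===== PRECONDITION & SPEC =====
def Spec_longest_consec (strarr : List String) (k : Int) (out : String) : Prop := out = longest_consec_alt strarr k
instance (strarr : List String) (k : Int) (out : String) : Decidable (Spec_longest_consec strarr k out) := by unfold Spec_longest_consec; infer_instance

-- ===== CLAIM (what is proved, stated in full; the proofs are below) =====
def Claim_equal_longest_consec : Prop := ∀ (strarr : List String) (k : Int), Dom_longest_consec strarr k → Spec_longest_consec strarr k (longest_consec strarr k)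

-- ===== LEMMAS AND PROOFS =====

-- window of length kt starting at i, as a map over range = take/drop
theorem window_map_eq {α : Type} (xs : List α) (d : α) (i kt : Nat) (h : i + kt ≤ xs.length) :
    (List.range kt).map (fun m => xs.getD (i + m) d) = (xs.drop i).take kt := by
  apply List.ext_getElem
  · simp; omega
  · intro j hj hj'
    have hjk : j < kt := by simpa using hj
    have : i + j < xs.length := by omega
    simp [List.getD, this]

-- the fold building the prefix list: full characterization with generalized accumulator
theorem prefix_fold (L : List String) (t0 : Int) (p0 : List Int) :
    (L.foldl
      (fun (st : Int × List Int) s =>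
        (st.1 + (PySem.Str.len s : Int), st.2 ++ [st.1 + (PySem.Str.len s : Int)]))
      (t0, p0)).2
    = p0 ++ (List.range L.length).map
        (fun m => t0 + (((L.take (m + 1)).map (fun s => (PySem.Str.len s : Int))).sum)) := by
  induction L generalizing t0 p0 with
  | nil => simp
  | cons s L ih =>
    rw [List.foldl_cons, ih]
    simp only [List.length_cons, List.range_succ_eq_map, List.map_cons, List.map_map]
    simp [List.append_assoc, Function.comp]
    intro a ha
    ring

theorem prefix_get (L : List String) (m : Nat) (hm : m ≤ L.length) :
    ((L.foldl
      (fun (st : Int × List Int) s =>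
        (st.1 + (PySem.Str.len s : Int), st.2 ++ [st.1 + (PySem.Str.len s : Int)]))
      (0, [0])).2).getD m 0
    = ((L.take m).map (fun s => (PySem.Str.len s : Int))).sum := by
  rw [prefix_fold]
  rcases m with _ | m
  · simp
  · have h1 : m < L.length := by omega
    simp [List.getD, h1]

theorem take_add_sum (L : List Int) (a b : Nat) :
    (L.take (a + b)).sum = (L.take a).sum + ((L.drop a).take b).sum := by
  rw [List.take_add, List.sum_append]

theorem longest_consec_spec' (strarr : List String) (k : Int) :
    longest_consec strarr k = longest_consec_alt strarr k := by
  unfold longest_consec longest_consec_alt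
  dsimp only
  split_ifs with hguard
  · rfl
  · push_neg at hguard
    obtain ⟨hn0, hkn, hk0⟩ := hguard
    set N := strarr.length with hN
    have hkpos : 0 < k := hk0
    set kt := k.toNat with hkt
    have hkcast : (kt : Int) = k := Int.toNat_of_nonneg (le_of_lt hkpos)
    have hktN : kt ≤ N := by omega
    have hktpos : 0 < kt := by omega
    -- the prefix list
    set prefixL : List Int := (strarr.foldl
      (fun (st : Int × List Int) s =>
        (st.1 + (PySem.Str.len s : Int), st.2 ++ [st.1 + (PySem.Str.len s : Int)]))
      (0, [0])).2 with hprefix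
    have hpget : ∀ m : Nat, m ≤ N → prefixL.getD m 0
        = ((strarr.take m).map (fun s => (PySem.Str.len s : Int))).sum := by
      intro m hm; exact prefix_get strarr m hm
    set Lens : List Int := strarr.map (fun s => (PySem.Str.len s : Int)) with hLens
    have hLenslen : Lens.length = N := by rw [hLens, List.length_map]
    -- the two window-sum lists are equal
    have hcore :
        (PySem.List.pyRange 0 ((N : Int) - k + 1) 1).map (fun i =>
          (PySem.List.pyRange 0 k 1).foldl
            (fun tempCounter j => tempCounter + (PySem.Str.len (PySem.List.pyGetD strarr (i + j) "") : Int)) 0)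
        = (PySem.List.pyRange 0 ((N : Int) - k + 1) 1).map
            (fun i => PySem.List.pyGetD prefixL (i + k) 0 - PySem.List.pyGetD prefixL i 0) := by
      apply List.map_congr_left
      intro i hi
      rw [PySem.List.mem_pyRange_one] at hi
      obtain ⟨hi0, hiub⟩ := hi
      set it := i.toNat with hit
      have hicast : (it : Int) = i := Int.toNat_of_nonneg hi0
      have hitb : it + kt ≤ N := by omega
      -- A's inner fold = window sum
      have hA :
          (PySem.List.pyRange 0 k 1).foldl
            (fun tempCounter j => tempCounter + (PySem.Str.len (PySem.List.pyGetD strarr (i + j) "") : Int)) 0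
          = ((Lens.drop it).take kt).sum := by
        rw [PySem.List.foldl_add, PySem.List.pyRange_one, List.map_map, zero_add]
        have h3 : ((k : Int) - 0).toNat = kt := by omega
        rw [h3, ← window_map_eq Lens 0 it kt (by omega)]
        refine congrArg List.sum (List.map_congr_left ?_)
        intro m hm
        rw [List.mem_range] at hm
        simp only [Function.comp_apply, zero_add]
        have hidx : i + (m : Int) = ((it + m : Nat) : Int) := by push_cast; omega
        rw [hidx, PySem.List.pyGetD_natCast]
        have hlt : it + m < strarr.length := by omega
        simp [hLens, List.getD, hlt]
      -- B's subtraction = window sum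
      have hB : PySem.List.pyGetD prefixL (i + k) 0 - PySem.List.pyGetD prefixL i 0
          = ((Lens.drop it).take kt).sum := by
        have h1 : i + k = ((it + kt : Nat) : Int) := by push_cast; omega
        have h2 : i = ((it : Nat) : Int) := by omega
        rw [h1, h2, PySem.List.pyGetD_natCast, PySem.List.pyGetD_natCast]
        rw [hpget (it + kt) hitb, hpget it (by omega)]
        have ht : ∀ m : Nat, (strarr.take m).map (fun s => (PySem.Str.len s : Int)) = Lens.take m := by
          intro m; rw [hLens, List.map_take]
        rw [ht, ht, take_add_sum Lens it kt]
        ring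
      rw [hA, hB]
    rw [hcore]
    -- now both sides share the same sums list; split the matches
    cases hmax : PySem.List.max? ((PySem.List.pyRange 0 ((N : Int) - k + 1) 1).map
            (fun i => PySem.List.pyGetD prefixL (i + k) 0 - PySem.List.pyGetD prefixL i 0)) (fun x => x) with
    | none => rfl
    | some m =>
      dsimp only
      cases hidxm : PySem.List.index? ((PySem.List.pyRange 0 ((N : Int) - k + 1) 1).map
            (fun i => PySem.List.pyGetD prefixL (i + k) 0 - PySem.List.pyGetD prefixL i 0)) m with
      | none => rfl
      | some idx =>
        dsimp only
        -- idx is in range: idx ≤ N - kt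
        have hlen : ((PySem.List.pyRange 0 ((N : Int) - k + 1) 1).map
            (fun i => PySem.List.pyGetD prefixL (i + k) 0 - PySem.List.pyGetD prefixL i 0)).length
            = ((N : Int) - k + 1).toNat := by
          simp [PySem.List.length_pyRange_one]
        obtain ⟨hidxlt, -, -⟩ := PySem.List.getElem_of_index?_eq_some hidxm
        rw [hlen] at hidxlt
        have hidxb : idx + kt ≤ N := by omega
        -- A's result-building loop = B's slice
        congr 1
        have h1 : (idx : Int) + k = ((idx : Int) + ((kt : Nat) : Int)) := by rw [hkcast]
        rw [h1, PySem.List.slice_natCast_add, PySem.List.pyRange_one]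
        have h2 : ((idx : Int) + (kt : Int) - (idx : Int)).toNat = kt := by omega
        rw [h2, List.map_map]
        rw [← window_map_eq strarr "" idx kt hidxb]
        apply List.map_congr_left
        intro m hm
        rw [List.mem_range] at hm
        simp only [Function.comp_apply]
        have hidx2 : (idx : Int) + (m : Int) = ((idx + m : Nat) : Int) := by push_cast; ring
        rw [hidx2, PySem.List.pyGetD_natCast]

-- ===== VERDICT (by name: the statement is the Claim_ definition above) =====
theorem longest_consec_spec : Claim_equal_longest_consec := by
  intro strarr k _
  unfold Spec_longest_consec
  exact longest_consec_spec' strarr k
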